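-- pv_equiv track=rewrite | github.com/bram2w/baserow | backend/src/baserow/core/utils.py | find_intermediate_fraction
-- ===== SOURCE A (Python) =====
-- from typing import Any, Dict, Iterable, List, Optional, Set, Tuple, Type, Union
--
-- def find_intermediate_fraction(p1: int, q1: int, p2: int, q2: int) -> Tuple[int, int]:
--     """
--     Find an intermediate fraction between p1/q1 and p2/q2.
--
--     The fraction chosen is the highest fraction in the Stern-Brocot tree which falls
--     strictly between the specified values. This is intended to avoid going deeper in
--     the tree unnecessarily when the list is already sparse due to deletion or moving
--     of items, but in fact the case when the two items are already adjacent in the tree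
--     is common so we shortcut it. As a bonus, this method always generates fractions
--     in lowest terms, so there is no need for GCD calculations  anywhere.
--
--     Based on `find_intermediate` in
--     https://wiki.postgresql.org/wiki/User-specified_ordering_with_fractions
--     """
--
--     pl = 0
--     ql = 1
--     ph = 1
--     qh = 0
--
--     if p1 * q2 + 1 != p2 * q1:
--         while True:
--             p = pl + ph
--             q = ql + qh
--             if p * q1 <= q * p1:
--                 pl = p
--                 ql = q
--             elif p2 * q <= q2 * p:
--                 ph = p
--                 qh = q
--             else:
--                 return p, q
--     else:
--         p = p1 + p2
--         q = q1 + q2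
--
--     return p, q
-- ===== SOURCE B (Python) =====
-- from typing import Tuple
--
--
-- def find_intermediate_fraction(p1: int, q1: int, p2: int, q2: int) -> Tuple[int, int]:
--     """
--     Same Stern-Brocot search as the original, but instead of taking mediant
--     steps one at a time, all consecutive steps in the same direction are
--     taken at once with a single integer division (Euclidean-style jumping),
--     so the number of loop iterations drops from the sum of the continued-
--     fraction coefficients to the number of coefficients.
--     """
--     if p1 * q2 + 1 == p2 * q1:
--         return p1 + p2, q1 + q2
--     pl, ql, ph, qh = 0, 1, 1, 0
--     while True:
--         # batch of consecutive "move low bound up" steps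
--         n = (ql * p1 - pl * q1) // (ph * q1 - qh * p1)
--         if n > 0:
--             pl, ql = pl + n * ph, ql + n * qh
--         # batch of consecutive "move high bound down" steps
--         m = (q2 * (pl + ph) - p2 * (ql + qh)) // (p2 * ql - q2 * pl)
--         if m < 0:
--             return pl + ph, ql + qh
--         ph, qh = ph + (m + 1) * pl, qh + (m + 1) * ql
-- ===== Notes on version B (the rewrite author's own statement) =====
-- stated objective: faster
-- what changed: Instead of descending the Stern-Brocot tree one mediant step per loop iteration, B computes the length of each maximal run of same-direction steps with one floor division and jumps the whole run at once (Euclidean-style batching), so iterations drop from the sum of the continued-fraction coefficients to their number.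
-- outside the precondition, e.g. on find_intermediate_fraction(-4, -3, 2, 3): A returns (1, 2), B returns (2, 1)
import Mathlib
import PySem

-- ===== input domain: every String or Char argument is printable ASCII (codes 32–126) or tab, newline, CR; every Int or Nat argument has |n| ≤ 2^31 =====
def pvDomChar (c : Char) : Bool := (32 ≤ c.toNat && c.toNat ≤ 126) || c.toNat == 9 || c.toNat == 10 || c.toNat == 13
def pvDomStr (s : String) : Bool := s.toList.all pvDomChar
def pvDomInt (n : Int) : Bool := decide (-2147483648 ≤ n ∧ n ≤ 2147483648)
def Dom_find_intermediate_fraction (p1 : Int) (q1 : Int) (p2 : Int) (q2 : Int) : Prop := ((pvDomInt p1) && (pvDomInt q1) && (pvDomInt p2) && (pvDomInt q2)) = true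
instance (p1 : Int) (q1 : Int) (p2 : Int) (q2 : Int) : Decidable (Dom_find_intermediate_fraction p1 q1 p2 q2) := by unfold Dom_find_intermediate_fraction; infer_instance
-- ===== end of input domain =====

-- B replaces the one-mediant-step-per-iteration Stern-Brocot descent of A by batching each
-- maximal run of same-direction steps into a single integer-division jump (objective: faster).

-- ===== PORT A =====
-- the 'while True' loop of A; fuel is the obvious structural-recursion counter (under
-- Pre_ the loop provably finishes long before pvFuel runs out, see the lemmas below)
def pvALoop (p1 q1 p2 q2 : Int) : Nat → Int → Int → Int → Int → Int × Int
  | 0, _, _, _, _ => (0, 0)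
  | fuel+1, pl, ql, ph, qh =>
    let p := pl + ph
    let q := ql + qh
    if p * q1 ≤ q * p1 then pvALoop p1 q1 p2 q2 fuel p q ph qh
    else if p2 * q ≤ q2 * p then pvALoop p1 q1 p2 q2 fuel pl ql p q
    else (p, q)

def pvFuel : Nat := 34359738368

def find_intermediate_fraction (p1 : Int) (q1 : Int) (p2 : Int) (q2 : Int) : Int × Int :=
  if p1 * q2 + 1 ≠ p2 * q1 then
    pvALoop p1 q1 p2 q2 pvFuel 0 1 1 0
  else
    (p1 + p2, q1 + q2)

-- ===== PORT B =====
-- the 'while True' loop of B (each iteration takes one batch of low-bound steps and one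
-- batch of high-bound steps); same fuel counter
def pvBLoop (p1 q1 p2 q2 : Int) : Nat → Int → Int → Int → Int → Int × Int
  | 0, _, _, _, _ => (0, 0)
  | fuel+1, pl, ql, ph, qh =>
    let n := PySem.Int.floordiv (ql * p1 - pl * q1) (ph * q1 - qh * p1)
    let pl' := if n > 0 then pl + n * ph else pl
    let ql' := if n > 0 then ql + n * qh else ql
    let m := PySem.Int.floordiv (q2 * (pl' + ph) - p2 * (ql' + qh)) (p2 * ql' - q2 * pl')
    if m < 0 then (pl' + ph, ql' + qh)
    else pvBLoop p1 q1 p2 q2 fuel pl' ql' (ph + (m + 1) * pl') (qh + (m + 1) * ql')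

def find_intermediate_fraction_alt (p1 : Int) (q1 : Int) (p2 : Int) (q2 : Int) : Int × Int :=
  if p1 * q2 + 1 = p2 * q1 then
    (p1 + p2, q1 + q2)
  else
    pvBLoop p1 q1 p2 q2 pvFuel 0 1 1 0

-- ===== PRECONDITION & SPEC =====
-- Pre_ is the function's natural domain plus every other input A answers immediately:
-- q1 ≥ 1 and p2 ≥ 1 with either a nonempty strict gap p1/q1 < p2/q2 (the Stern-Brocot
-- search) or p1 < q1 and q2 < p2 (both root tests fail at once and 1/1 is returned), or
-- the two fractions are tree-adjacent (the shortcut branch, any signs). Outside it A's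
-- loop diverges on most inputs; where it does return (q1 ≤ 0 or p2 ≤ 0), the value is an
-- accident of the inverted comparisons, so those inputs are excluded.
def Pre_find_intermediate_fraction (p1 : Int) (q1 : Int) (p2 : Int) (q2 : Int) : Prop :=
  (1 ≤ q1 ∧ 1 ≤ p2 ∧ (p1 * q2 < p2 * q1 ∨ (p1 < q1 ∧ q2 < p2))) ∨ p1 * q2 + 1 = p2 * q1

instance (p1 : Int) (q1 : Int) (p2 : Int) (q2 : Int) : Decidable (Pre_find_intermediate_fraction p1 q1 p2 q2) := by unfold Pre_find_intermediate_fraction; infer_instance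

def pvWitness_find_intermediate_fraction : Int × Int × Int × Int := (1, 3, 1, 2)

def Spec_find_intermediate_fraction (p1 : Int) (q1 : Int) (p2 : Int) (q2 : Int) (out : Int × Int) : Prop := out = find_intermediate_fraction_alt p1 q1 p2 q2
instance (p1 : Int) (q1 : Int) (p2 : Int) (q2 : Int) (out : Int × Int) : Decidable (Spec_find_intermediate_fraction p1 q1 p2 q2 out) := by unfold Spec_find_intermediate_fraction; infer_instance

-- ===== CLAIM (what is proved, stated in full; the proofs are below) =====
def Claim_equal_find_intermediate_fraction : Prop := ∀ (p1 : Int) (q1 : Int) (p2 : Int) (q2 : Int), Dom_find_intermediate_fraction p1 q1 p2 q2 → Pre_find_intermediate_fraction p1 q1 p2 q2 → Spec_find_intermediate_fraction p1 q1 p2 q2 (find_intermediate_fraction p1 q1 p2 q2)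

-- ===== LEMMAS AND PROOFS =====

-- loop invariant of the Stern-Brocot descent: the bracket (pl,ql),(ph,qh) stays in the
-- closed positive cone with determinant 1, the low bound stays strictly below p2/q2, the
-- high bound strictly above p1/q1, and bookkeeping facts for negative p1 / the untouched
-- initial high bound
def pvInv (p1 q1 p2 q2 pl ql ph qh : Int) : Prop :=
  0 ≤ pl ∧ 1 ≤ ql ∧ 1 ≤ ph ∧ 0 ≤ qh ∧ ph * ql - pl * qh = 1 ∧
  1 ≤ ph * q1 - qh * p1 ∧ 1 ≤ p2 * ql - q2 * pl ∧
  (0 ≤ p1 → pl * q1 ≤ ql * p1) ∧ (p1 < 0 → pl = 0) ∧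
  (p2 * qh ≤ q2 * ph ∨ (ph = 1 ∧ qh = 0))

-- determinant-1 bracketing: a fraction strictly inside the bracket bounds the bracket sums
lemma pvDetBound (pl ql ph qh a b : Int)
    (h1 : 0 ≤ pl) (h2 : 1 ≤ ql) (h3 : 1 ≤ ph) (h4 : 0 ≤ qh)
    (hdet : ph * ql - pl * qh = 1)
    (ha : 1 ≤ a * ql - b * pl) (hb : 1 ≤ b * ph - a * qh) :
    pl + ph ≤ a ∧ ql + qh ≤ b := by
  constructor
  · nlinarith [mul_le_mul_of_nonneg_left ha (by linarith : (0:Int) ≤ ph),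
      mul_le_mul_of_nonneg_left hb (by linarith : (0:Int) ≤ pl)]
  · nlinarith [mul_le_mul_of_nonneg_left hb (by linarith : (0:Int) ≤ ql),
      mul_le_mul_of_nonneg_left ha (by linarith : (0:Int) ≤ qh)]

-- while the loop is running the state stays bounded by the input size
lemma pvBound (p1 q1 p2 q2 pl ql ph qh : Int)
    (hq1 : 1 ≤ q1) (hp2 : 1 ≤ p2)
    (h : pvInv p1 q1 p2 q2 pl ql ph qh) :
    pl + ql + ph + qh ≤ max p1 0 + p2 + q1 + max q2 0 + 2 := by
  obtain ⟨h1, h2, h3, h4, hdet, hA1, hA2, h8, h10, h11⟩ := h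
  have hm1 : p1 ≤ max p1 0 := le_max_left p1 0
  have hm1' : (0:Int) ≤ max p1 0 := le_max_right p1 0
  have hm2 : q2 ≤ max q2 0 := le_max_left q2 0
  have hm2' : (0:Int) ≤ max q2 0 := le_max_right q2 0
  have hpl : pl ≤ max p1 0 := by
    by_cases hp : 0 ≤ p1
    · have := h8 hp
      have hq : pl ≤ pl * q1 := le_mul_of_one_le_right h1 hq1
      -- pl ≤ pl*q1 ≤ ql*p1 and p1 ≥ 0; if pl > p1 then pl*q1 ≥ pl > p1 ≥ ... contradiction via ql
      nlinarith
    · rw [h10 (by linarith)]; exact hm1'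
  rcases h11 with h11 | ⟨hph1, hqh0⟩
  · by_cases hq2s : q2 ≤ 0
    · -- q2 ≤ 0: the high bound was never moved
      have hqh : qh = 0 := by nlinarith
      have hph : ph = 1 := by nlinarith [hqh]
      have hql : ql = 1 := by nlinarith [hqh, hph]
      rw [hqh, hph, hql]; linarith
    · rw [not_le] at hq2s
      by_cases hp : 0 ≤ p1
      · have ha : 1 ≤ (p1 + p2) * ql - (q1 + q2) * pl := by nlinarith [h8 hp]
        have hb : 1 ≤ (q1 + q2) * ph - (p1 + p2) * qh := by nlinarith
        have := pvDetBound pl ql ph qh (p1 + p2) (q1 + q2) h1 h2 h3 h4 hdet ha hb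
        linarith [this.1, this.2]
      · rw [not_le] at hp
        have hpl0 : pl = 0 := h10 hp
        have ha : 1 ≤ p2 * ql - (q2 + 1) * pl := by rw [hpl0]; nlinarith
        have hb : 1 ≤ (q2 + 1) * ph - p2 * qh := by nlinarith
        have := pvDetBound pl ql ph qh p2 (q2 + 1) h1 h2 h3 h4 hdet ha hb
        linarith [this.1, this.2]
  · -- high bound untouched: ql = 1 from the determinant
    have hql : ql = 1 := by nlinarith [hph1, hqh0]
    rw [hph1, hqh0, hql]; linarith

-- invariant preservation under a batch of N low-bound steps
lemma pvInvL (p1 q1 p2 q2 pl ql ph qh N : Int)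
    (hq1 : 1 ≤ q1) (hp2 : 1 ≤ p2) (hgap : p1 * q2 + 2 ≤ p2 * q1)
    (hN : 0 ≤ N)
    (hor : N = 0 ∨ N * (ph * q1 - qh * p1) ≤ ql * p1 - pl * q1)
    (h : pvInv p1 q1 p2 q2 pl ql ph qh) :
    pvInv p1 q1 p2 q2 (pl + N * ph) (ql + N * qh) ph qh := by
  rcases hor with rfl | hle
  · simpa using h
  obtain ⟨h1, h2, h3, h4, hdet, hA1, hA2, h8, h10, h11⟩ := h
  have hcross : (pl + N * ph) * q1 ≤ (ql + N * qh) * p1 := by nlinarith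
  refine ⟨by nlinarith, by nlinarith, h3, h4,
    by ring_nf; ring_nf at hdet; linarith, hA1, ?_, fun _ => hcross, ?_, h11⟩
  · -- the new low bound is still strictly below p2/q2
    have hpl' : 0 ≤ pl + N * ph := by nlinarith [mul_nonneg hN (by linarith : (0:Int) ≤ ph)]
    have hql' : 1 ≤ ql + N * qh := by nlinarith [mul_nonneg hN h4]
    by_cases hq2s : q2 ≤ 0
    · nlinarith [mul_le_mul_of_nonneg_right hp2 (by linarith : (0:Int) ≤ ql + N * qh),
        mul_nonpos_of_nonpos_of_nonneg hq2s hpl']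
    · rw [not_le] at hq2s
      nlinarith [mul_le_mul_of_nonneg_left hcross (by linarith : (0:Int) ≤ q2),
        mul_le_mul_of_nonneg_right hgap (by linarith : (0:Int) ≤ ql + N * qh), hql']
  · -- with p1 < 0 no low-bound step is possible at all
    intro hp
    rcases eq_or_lt_of_le hN with hz | hpos
    · rw [h10 hp, ← hz]; ring
    · exfalso
      have : ql * p1 ≤ -ql := by nlinarith
      nlinarith [h10 hp]

-- invariant preservation under a batch of M+1 high-bound steps
lemma pvInvR (p1 q1 p2 q2 pl ql ph qh M : Int)
    (hq1 : 1 ≤ q1) (hp2 : 1 ≤ p2) (hgap : p1 * q2 + 2 ≤ p2 * q1)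
    (hM : 0 ≤ M)
    (hle : M * (p2 * ql - q2 * pl) ≤ q2 * (pl + ph) - p2 * (ql + qh))
    (h : pvInv p1 q1 p2 q2 pl ql ph qh) :
    pvInv p1 q1 p2 q2 pl ql (ph + (M + 1) * pl) (qh + (M + 1) * ql) := by
  obtain ⟨h1, h2, h3, h4, hdet, hA1, hA2, h8, h10, h11⟩ := h
  have hvh : p2 * (qh + (M + 1) * ql) ≤ q2 * (ph + (M + 1) * pl) := by nlinarith
  refine ⟨h1, h2, by nlinarith, by nlinarith,
    by ring_nf; ring_nf at hdet; linarith, ?_, hA2, h8, h10, Or.inl hvh⟩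
  -- the new high bound is still strictly above p1/q1
  have hph'' : 1 ≤ ph + (M + 1) * pl := by
    nlinarith [mul_nonneg (by linarith : (0:Int) ≤ M + 1) h1]
  have hqh'' : 0 ≤ qh + (M + 1) * ql := by
    nlinarith [mul_nonneg (by linarith : (0:Int) ≤ M + 1) (by linarith : (0:Int) ≤ ql)]
  by_cases hp : 0 ≤ p1
  · nlinarith [mul_le_mul_of_nonneg_left hvh hp,
      mul_le_mul_of_nonneg_right hgap (by linarith : (0:Int) ≤ ph + (M + 1) * pl), hph'']
  · rw [not_le] at hp
    nlinarith [mul_le_mul_of_nonneg_right hq1 (by linarith : (0:Int) ≤ ph + (M + 1) * pl),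
      mul_nonneg hqh'' (by linarith : (0:Int) ≤ -p1)]

-- a batch of k consecutive low-bound mediant steps of A
lemma pvBatchL (p1 q1 p2 q2 : Int) :
    ∀ (k : Nat) (af : Nat) (pl ql ph qh : Int),
      (∀ j : Nat, j < k → ((j : Int) + 1) * (ph * q1 - qh * p1) ≤ ql * p1 - pl * q1) →
      pvALoop p1 q1 p2 q2 (af + k) pl ql ph qh
        = pvALoop p1 q1 p2 q2 af (pl + (k : Int) * ph) (ql + (k : Int) * qh) ph qh := by
  intro k
  induction k with
  | zero => intro af pl ql ph qh _; simp
  | succ k ih =>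
    intro af pl ql ph qh hcond
    have h0 := hcond 0 (Nat.succ_pos k)
    have hstep : (pl + ph) * q1 ≤ (ql + qh) * p1 := by push_cast at h0; nlinarith
    have : af + (k + 1) = (af + k) + 1 := by omega
    rw [this]
    show (if (pl + ph) * q1 ≤ (ql + qh) * p1 then
        pvALoop p1 q1 p2 q2 (af + k) (pl + ph) (ql + qh) ph qh
      else _) = _
    rw [if_pos hstep]
    rw [ih af (pl + ph) (ql + qh) ph qh (by
      intro j hj
      have := hcond (j + 1) (by omega)
      push_cast at this ⊢
      nlinarith)]
    congr 1 <;> push_cast <;> ring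

-- a batch of k consecutive high-bound mediant steps of A (the low-bound test stays false
-- throughout because the two tests are mutually exclusive when the gap is nonempty)
lemma pvBatchR (p1 q1 p2 q2 : Int) (hq1 : 1 ≤ q1) (hp2 : 1 ≤ p2)
    (hgap : p1 * q2 + 2 ≤ p2 * q1) :
    ∀ (k : Nat) (af : Nat) (pl ql ph qh : Int),
      0 ≤ pl → 1 ≤ ql → 1 ≤ ph → 0 ≤ qh →
      (∀ j : Nat, j < k → (j : Int) * (p2 * ql - q2 * pl) ≤ q2 * (pl + ph) - p2 * (ql + qh)) →
      pvALoop p1 q1 p2 q2 (af + k) pl ql ph qh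
        = pvALoop p1 q1 p2 q2 af pl ql (ph + (k : Int) * pl) (qh + (k : Int) * ql) := by
  intro k
  induction k with
  | zero => intro af pl ql ph qh _ _ _ _ _; simp
  | succ k ih =>
    intro af pl ql ph qh hpl hql hph hqh hcond
    have h0 := hcond 0 (Nat.succ_pos k)
    have hr : p2 * (ql + qh) ≤ q2 * (pl + ph) := by push_cast at h0; linarith
    have hlf : ¬ (pl + ph) * q1 ≤ (ql + qh) * p1 := by
      intro hlt
      by_cases hp : 0 ≤ p1
      · nlinarith [mul_le_mul_of_nonneg_left hr hp]
      · rw [not_le] at hp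
        nlinarith
    have : af + (k + 1) = (af + k) + 1 := by omega
    rw [this]
    show (if (pl + ph) * q1 ≤ (ql + qh) * p1 then _
      else if p2 * (ql + qh) ≤ q2 * (pl + ph) then
        pvALoop p1 q1 p2 q2 (af + k) pl ql (pl + ph) (ql + qh)
      else _) = _
    rw [if_neg hlf, if_pos hr]
    rw [ih af pl ql (pl + ph) (ql + qh) hpl hql (by linarith) (by linarith) (by
      intro j hj
      have := hcond (j + 1) (by omega)
      push_cast at this ⊢
      nlinarith)]
    congr 1 <;> push_cast <;> ring

-- the central lemma: with enough fuel, A's one-step loop and B's batched loop agree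
set_option maxHeartbeats 2000000 in
lemma pvMain (p1 q1 p2 q2 : Int) (hq1 : 1 ≤ q1) (hp2 : 1 ≤ p2)
    (hgap : p1 * q2 + 2 ≤ p2 * q1) :
    ∀ (μ : Nat) (pl ql ph qh : Int) (af bf : Nat),
      pvInv p1 q1 p2 q2 pl ql ph qh →
      max p1 0 + p2 + q1 + max q2 0 + 2 ≤ pl + ql + ph + qh + (μ : Int) →
      μ < af → μ < bf →
      pvALoop p1 q1 p2 q2 af pl ql ph qh = pvBLoop p1 q1 p2 q2 bf pl ql ph qh := by
  intro μ
  induction μ using Nat.strong_induction_on with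
  | _ μ IH =>
    intro pl ql ph qh af bf hinv hS haf hbf
    obtain ⟨h1, h2, h3, h4, hdet, hA1, hA2old, h8, h10, h11⟩ := hinv
    have hinv0 : pvInv p1 q1 p2 q2 pl ql ph qh :=
      ⟨h1, h2, h3, h4, hdet, hA1, hA2old, h8, h10, h11⟩
    have hA1' : (0:Int) < ph * q1 - qh * p1 := by linarith
    set n := PySem.Int.floordiv (ql * p1 - pl * q1) (ph * q1 - qh * p1) with hn_def
    -- N is the number of low-bound steps A takes now: n if positive, else none
    have hN0 : 0 ≤ max n 0 := le_max_right n 0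
    have hor : max n 0 = 0 ∨ max n 0 * (ph * q1 - qh * p1) ≤ ql * p1 - pl * q1 := by
      by_cases h : 0 < n
      · right
        rw [max_eq_left (by linarith : (0:Int) ≤ n), hn_def]
        exact (PySem.Int.le_floordiv_iff_mul_le hA1').1 (by rw [← hn_def])
      · left
        exact max_eq_right (by linarith [not_lt.mp h])
    have hNlt : ql * p1 - pl * q1 < (max n 0 + 1) * (ph * q1 - qh * p1) := by
      by_cases h : 0 < n
      · rw [max_eq_left (by linarith : (0:Int) ≤ n), hn_def]
        exact (PySem.Int.floordiv_lt_iff_lt_mul hA1').1 (by rw [← hn_def]; exact lt_add_one n)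
      · rw [max_eq_right (by linarith [not_lt.mp h])]
        have hlt1 : n < 1 := by omega
        rw [hn_def] at hlt1
        have := (PySem.Int.floordiv_lt_iff_lt_mul hA1').1 hlt1
        linarith
    have hinv' : pvInv p1 q1 p2 q2 (pl + max n 0 * ph) (ql + max n 0 * qh) ph qh :=
      pvInvL p1 q1 p2 q2 pl ql ph qh (max n 0) hq1 hp2 hgap hN0 hor hinv0
    have hbnd' := pvBound p1 q1 p2 q2 (pl + max n 0 * ph) (ql + max n 0 * qh) ph qh
      hq1 hp2 hinv'
    have hk : (((max n 0).toNat : Int)) = max n 0 := Int.toNat_of_nonneg hN0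
    have tn : max n 0 ≤ max n 0 * (ph + qh) := le_mul_of_one_le_right hN0 (by linarith)
    have hnμ : max n 0 ≤ (μ : Int) := by nlinarith [hbnd', tn]
    have hkμ : (max n 0).toNat ≤ μ := by omega
    -- batch the low-bound steps of A
    have hcondL : ∀ j : Nat, j < (max n 0).toNat →
        ((j : Int) + 1) * (ph * q1 - qh * p1) ≤ ql * p1 - pl * q1 := by
      intro j hj
      have hpos : (0:Int) < max n 0 := by omega
      have hle := hor.resolve_left (by omega)
      have hjn : ((j : Int) + 1) ≤ max n 0 := by omega
      have hmul := mul_le_mul_of_nonneg_right hjn (by linarith : (0:Int) ≤ ph * q1 - qh * p1)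
      linarith
    have haf1 : af = (af - (max n 0).toNat) + (max n 0).toNat := by omega
    rw [haf1, pvBatchL p1 q1 p2 q2 (max n 0).toNat (af - (max n 0).toNat) pl ql ph qh hcondL,
      hk]
    -- the low-bound test now fails
    have hlf : ¬ ((pl + max n 0 * ph + ph) * q1 ≤ (ql + max n 0 * qh + qh) * p1) := by
      have : (ql + max n 0 * qh + qh) * p1 < (pl + max n 0 * ph + ph) * q1 := by
        nlinarith [hNlt]
      exact not_le.mpr this
    have hA2 : 1 ≤ p2 * (ql + max n 0 * qh) - q2 * (pl + max n 0 * ph) := hinv'.2.2.2.2.2.2.1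
    have hA2' : (0:Int) < p2 * (ql + max n 0 * qh) - q2 * (pl + max n 0 * ph) := by linarith
    -- unfold one iteration of B
    obtain ⟨bf', rfl⟩ : ∃ bf', bf = bf' + 1 := ⟨bf - 1, by omega⟩
    simp only [pvBLoop]
    rw [← hn_def]
    have e1 : (if n > 0 then pl + n * ph else pl) = pl + max n 0 * ph := by
      by_cases h : n > 0
      · rw [if_pos h, max_eq_left (by linarith : (0:Int) ≤ n)]
      · rw [if_neg h, max_eq_right (by linarith [not_lt.mp h] : n ≤ 0)]
        ring
    have e2 : (if n > 0 then ql + n * qh else ql) = ql + max n 0 * qh := by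
      by_cases h : n > 0
      · rw [if_pos h, max_eq_left (by linarith : (0:Int) ≤ n)]
      · rw [if_neg h, max_eq_right (by linarith [not_lt.mp h] : n ≤ 0)]
        ring
    rw [e1, e2]
    set m := PySem.Int.floordiv
      (q2 * (pl + max n 0 * ph + ph) - p2 * (ql + max n 0 * qh + qh))
      (p2 * (ql + max n 0 * qh) - q2 * (pl + max n 0 * ph)) with hm_def
    by_cases hB2 : q2 * (pl + max n 0 * ph + ph) - p2 * (ql + max n 0 * qh + qh) < 0
    · -- both tests fail: A returns the mediant, B returns the same pair
      have hmneg : m < 0 := by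
        rw [hm_def]
        exact (PySem.Int.floordiv_lt_iff_lt_mul hA2').2 (by linarith)
      rw [if_pos hmneg]
      obtain ⟨t, ht⟩ : ∃ t, af - (max n 0).toNat = t + 1 := ⟨af - (max n 0).toNat - 1, by omega⟩
      rw [ht]
      simp only [pvALoop]
      rw [if_neg hlf, if_neg (not_le.mpr (by linarith))]
    · -- at least one high-bound step: batch them and recurse
      rw [not_lt] at hB2
      have hm0 : 0 ≤ m := by
        rw [hm_def]
        exact (PySem.Int.le_floordiv_iff_mul_le hA2').2 (by linarith)
      have hmle : m * (p2 * (ql + max n 0 * qh) - q2 * (pl + max n 0 * ph))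
          ≤ q2 * (pl + max n 0 * ph + ph) - p2 * (ql + max n 0 * qh + qh) := by
        rw [hm_def]
        exact (PySem.Int.le_floordiv_iff_mul_le hA2').1 (by rw [← hm_def])
      rw [if_neg (not_lt.mpr hm0)]
      obtain ⟨g1, g2, g3, g4, gdet, gA1, gA2, g8, g10, g11⟩ := hinv'
      have hinv'' : pvInv p1 q1 p2 q2 (pl + max n 0 * ph) (ql + max n 0 * qh)
          (ph + (m + 1) * (pl + max n 0 * ph)) (qh + (m + 1) * (ql + max n 0 * qh)) :=
        pvInvR p1 q1 p2 q2 (pl + max n 0 * ph) (ql + max n 0 * qh) ph qh m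
          hq1 hp2 hgap hm0 hmle ⟨g1, g2, g3, g4, gdet, gA1, gA2, g8, g10, g11⟩
      have hbnd'' := pvBound p1 q1 p2 q2 (pl + max n 0 * ph) (ql + max n 0 * qh)
        (ph + (m + 1) * (pl + max n 0 * ph)) (qh + (m + 1) * (ql + max n 0 * qh))
        hq1 hp2 hinv''
      have hr1 : ((m + 1).toNat : Int) = m + 1 := Int.toNat_of_nonneg (by omega)
      have tm : m + 1 ≤ (m + 1) * ((pl + max n 0 * ph) + (ql + max n 0 * qh)) :=
        le_mul_of_one_le_right (by omega) (by linarith)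
      have hsum : max n 0 + (m + 1) ≤ (μ : Int) := by nlinarith [hbnd'', tn, tm]
      have hraf : (m + 1).toNat ≤ af - (max n 0).toNat := by omega
      have haf2 : af - (max n 0).toNat
          = ((af - (max n 0).toNat - (m + 1).toNat) + (m + 1).toNat) := by omega
      have hcondR : ∀ j : Nat, j < (m + 1).toNat →
          (j : Int) * (p2 * (ql + max n 0 * qh) - q2 * (pl + max n 0 * ph))
            ≤ q2 * (pl + max n 0 * ph + ph) - p2 * (ql + max n 0 * qh + qh) := by
        intro j hj
        have hjm : (j : Int) ≤ m := by omega
        have hmul := mul_le_mul_of_nonneg_right hjm (by linarith : (0:Int)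
          ≤ p2 * (ql + max n 0 * qh) - q2 * (pl + max n 0 * ph))
        linarith
      have hbatchR := pvBatchR p1 q1 p2 q2 hq1 hp2 hgap (m + 1).toNat
        (af - (max n 0).toNat - (m + 1).toNat) (pl + max n 0 * ph) (ql + max n 0 * qh)
        ph qh g1 g2 g3 g4 hcondR
      rw [haf2, hbatchR, hr1]
      exact IH (μ - ((max n 0).toNat + (m + 1).toNat)) (by omega)
        (pl + max n 0 * ph) (ql + max n 0 * qh)
        (ph + (m + 1) * (pl + max n 0 * ph)) (qh + (m + 1) * (ql + max n 0 * qh))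
        (af - (max n 0).toNat - (m + 1).toNat) bf' hinv''
        (by
          have hc : ((μ - ((max n 0).toNat + (m + 1).toNat) : Nat) : Int)
              = (μ : Int) - max n 0 - (m + 1) := by omega
          rw [hc]
          nlinarith [tn, tm])
        (by omega) (by omega)

-- ===== VERDICT (by name: the statement is the Claim_ definition above) =====
theorem find_intermediate_fraction_spec : Claim_equal_find_intermediate_fraction := by
  unfold Claim_equal_find_intermediate_fraction Spec_find_intermediate_fraction
  intro p1 q1 p2 q2 hdom hpre
  simp only [Dom_find_intermediate_fraction, pvDomInt, Bool.and_eq_true, decide_eq_true_eq]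
    at hdom
  obtain ⟨⟨⟨hd1, hd2⟩, hd3⟩, hd4⟩ := hdom
  unfold find_intermediate_fraction find_intermediate_fraction_alt
  by_cases hc : p1 * q2 + 1 = p2 * q1
  · rw [if_neg (not_not_intro hc), if_pos hc]
  · obtain ⟨hq1, hp2, hord⟩ := hpre.resolve_right hc
    rw [if_pos hc, if_neg hc]
    obtain ⟨t, ht⟩ : ∃ t, pvFuel = t + 1 := ⟨34359738367, by norm_num [pvFuel]⟩
    rcases hord with hlt | ⟨hpq, hqp⟩
    · -- the Stern-Brocot search: the batched loop agrees with the one-step loop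
      have hgap : p1 * q2 + 2 ≤ p2 * q1 := by omega
      have hinv0 : pvInv p1 q1 p2 q2 0 1 1 0 :=
        ⟨le_refl 0, le_refl 1, le_refl 1, le_refl 0, by ring, by linarith, by linarith,
          fun hp => by linarith, fun _ => rfl, Or.inr ⟨rfl, rfl⟩⟩
      exact pvMain p1 q1 p2 q2 hq1 hp2 hgap 17179869184 0 1 1 0 pvFuel pvFuel hinv0
        (by push_cast; omega) (by norm_num [pvFuel]) (by norm_num [pvFuel])
    · -- both root tests fail at once: each loop returns the root mediant 1/1 immediately
      have hq1' : (0:Int) < q1 := by linarith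
      have hp2' : (0:Int) < p2 := by linarith
      have hA : pvALoop p1 q1 p2 q2 pvFuel 0 1 1 0 = (0 + 1, 1 + 0) := by
        rw [ht]
        simp only [pvALoop]
        rw [if_neg (not_le.mpr (by linarith)), if_neg (not_le.mpr (by linarith))]
      have hB : pvBLoop p1 q1 p2 q2 pvFuel 0 1 1 0 = (0 + 1, 1 + 0) := by
        rw [ht]
        simp only [pvBLoop]
        have e0 : (1:Int) * p1 - 0 * q1 = p1 := by ring
        have e0' : (1:Int) * q1 - 0 * p1 = q1 := by ring
        rw [e0, e0']
        have hn : ¬ (PySem.Int.floordiv p1 q1 > 0) := by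
          have := (PySem.Int.floordiv_lt_iff_lt_mul hq1').2 (by linarith : p1 < 1 * q1)
          omega
        simp only [if_neg hn]
        have e1 : q2 * (0 + 1) - p2 * (1 + 0) = q2 - p2 := by ring
        have e1' : p2 * 1 - q2 * 0 = p2 := by ring
        rw [e1, e1']
        have hm : PySem.Int.floordiv (q2 - p2) p2 < 0 :=
          (PySem.Int.floordiv_lt_iff_lt_mul hp2').2 (by linarith : q2 - p2 < 0 * p2)
        rw [if_pos hm]
      rw [hA, hB]
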